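-- pv_equiv track=rewrite | github.com/rite2vinoth/battleship | battleships.py | is_open_sea
-- ===== SOURCE A (Python) =====
-- def get_coordinates(ship):
--     ''' returns coordinates (i.e squares) occupied by the ship. It may be assumed that a legal arrangement of ship is passed '''
--
--     row_head, col_head, horiz, length = ship[0], ship[1], ship[2], ship[3]
--     coord_set = set()
--     for i in range(length):
--         # If ship is horizontal, we keep row index same and increment column
--         if horiz:
--             coord_set.add((row_head, col_head+i))
--         # If ship is vertical, we keep col index same and increment row index
--         else:
--             coord_set.add((row_head+i, col_head))
--     return coord_set
--
-- def is_open_sea(row, column, fleet):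
--     '''checks if the square given by `row` and `column` neither contains nor is adjacent (horizontally, vertically, or diagonally)
--        to some ship in `fleet`. Returns Boolean `True` if so and `False` otherwise'''
--     # obtain adjacent and own squares occupied by ships and testing given row, column iteratively
--     # loop through each ship in the fleet
--     for ship in fleet:
--         # find each ship's coordinates
--         coord_set = get_coordinates(ship)
--         # obtain individual coordinate tuple individually
--         for coord in coord_set:
--             row_index, col_index = coord[0], coord[1]
--             x_list = [x for x in range(row_index-1, row_index+2)]
--             y_list = [y for y in range(col_index-1, col_index+2)]
--             # create a set to hold occupied and adjacent coordinates
--             occ_coord = set()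
--             for i in range(len(x_list)):
--                 for j in range(len(y_list)):
--                     # check the fringe coordinates for out of ocean test
--                     if not (y_list[j] in [-1, 10] or x_list[i] in [-1, 10]):
--                         occ_coord.add((x_list[i], y_list[j]))
--                         # check if supplied row, column is present in occupied / adjacent coordinates set
--                         if {(row, column)}.issubset(occ_coord):
--                             return False
--
--     return True
-- ===== SOURCE B (Python) =====
-- def is_open_sea(row, column, fleet):
--     # Direct Chebyshev-distance test against each occupied square; no neighborhood sets.
--     if row in (-1, 10) or column in (-1, 10):
--         return True
--     for ship in fleet:
--         r, c, horiz, length = ship[0], ship[1], ship[2], ship[3]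
--         for i in range(length):
--             rr, cc = (r, c + i) if horiz else (r + i, c)
--             if abs(row - rr) <= 1 and abs(column - cc) <= 1:
--                 return False
--     return True
-- ===== Notes on version B (the rewrite author's own statement) =====
-- stated objective: simpler
-- what changed: Instead of materializing, for every occupied square, the 3x3 neighborhood as a set and testing the query square for membership after each insertion, B hoists the -1/10 board-edge exclusion out of the loops and tests each occupied square directly with a Chebyshev-distance comparison (abs differences <= 1); this removes all set construction, a large constant factor.
import Mathlib
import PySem

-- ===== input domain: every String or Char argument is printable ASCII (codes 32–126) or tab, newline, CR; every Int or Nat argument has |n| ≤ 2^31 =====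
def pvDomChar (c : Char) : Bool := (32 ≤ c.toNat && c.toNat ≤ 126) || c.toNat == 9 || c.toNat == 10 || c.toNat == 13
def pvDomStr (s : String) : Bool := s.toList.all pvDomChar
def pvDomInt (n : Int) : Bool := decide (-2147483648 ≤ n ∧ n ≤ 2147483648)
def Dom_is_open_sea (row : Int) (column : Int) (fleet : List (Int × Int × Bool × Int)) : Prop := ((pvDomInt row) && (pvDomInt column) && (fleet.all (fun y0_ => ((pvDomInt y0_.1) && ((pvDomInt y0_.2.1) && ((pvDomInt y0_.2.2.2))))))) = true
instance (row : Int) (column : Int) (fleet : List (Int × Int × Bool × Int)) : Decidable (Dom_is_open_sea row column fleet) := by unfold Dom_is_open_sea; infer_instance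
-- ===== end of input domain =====

-- B replaces A's per-square 3×3 neighborhood-set construction and subset test by a direct
-- Chebyshev-distance comparison against each occupied square (objective: simpler).


-- ===== PORT A =====
def get_coordinates (ship : Int × Int × Bool × Int) : PySem.Set (Int × Int) :=
  (PySem.List.pyRange 0 ship.2.2.2 1).foldl
    (fun coord_set i =>
      if ship.2.2.1 then PySem.Set.add coord_set (ship.1, ship.2.1 + i)
      else PySem.Set.add coord_set (ship.1 + i, ship.2.1))
    PySem.Set.empty

-- the loop body of the 3×3 neighborhood scan (named so the lemmas below can speak about it)
def pvStep (row column x : Int) (st : PySem.Set (Int × Int) × Bool) (y : Int) :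
    PySem.Set (Int × Int) × Bool :=
  if st.2 then st
  else if !(y = -1 || y = 10 || x = -1 || x = 10) then
    (PySem.Set.add st.1 (x, y),
     PySem.Set.issubset (PySem.Set.ofList [(row, column)]) (PySem.Set.add st.1 (x, y)))
  else st

-- the inner 'for coord in coord_set' body: 3×3 neighborhood loops with early return
def coord_check (row : Int) (column : Int) (coord : Int × Int) : Bool :=
  let x_list := PySem.List.pyRange (coord.1 - 1) (coord.1 + 2) 1
  let y_list := PySem.List.pyRange (coord.2 - 1) (coord.2 + 2) 1
  let st := x_list.foldl (fun st x => y_list.foldl (pvStep row column x) st)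
    ((PySem.Set.empty : PySem.Set (Int × Int)), false)
  st.2

def is_open_sea (row : Int) (column : Int) (fleet : List (Int × Int × Bool × Int)) : Bool :=
  !(fleet.any (fun ship => (get_coordinates ship).any (coord_check row column)))

-- ===== PORT B =====
def is_open_sea_alt (row : Int) (column : Int) (fleet : List (Int × Int × Bool × Int)) : Bool :=
  if row = -1 || row = 10 || column = -1 || column = 10 then true
  else !(fleet.any (fun ship =>
    (PySem.List.pyRange 0 ship.2.2.2 1).any (fun i =>
      let rr := if ship.2.2.1 then ship.1 else ship.1 + i
      let cc := if ship.2.2.1 then ship.2.1 + i else ship.2.1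
      (row - rr).natAbs ≤ 1 && (column - cc).natAbs ≤ 1)))

-- ===== PRECONDITION & SPEC =====
def Spec_is_open_sea (row : Int) (column : Int) (fleet : List (Int × Int × Bool × Int)) (out : Bool) : Prop := out = is_open_sea_alt row column fleet
instance (row : Int) (column : Int) (fleet : List (Int × Int × Bool × Int)) (out : Bool) : Decidable (Spec_is_open_sea row column fleet out) := by unfold Spec_is_open_sea; infer_instance

-- ===== CLAIM (what is proved, stated in full; the proofs are below) =====
def Claim_equal_is_open_sea : Prop := ∀ (row : Int) (column : Int) (fleet : List (Int × Int × Bool × Int)), Dom_is_open_sea row column fleet → Spec_is_open_sea row column fleet (is_open_sea row column fleet)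

-- ===== LEMMAS AND PROOFS =====

lemma pv_issubset_single {α : Type} [BEq α] [LawfulBEq α] (q : α) (s : PySem.Set α) :
    PySem.Set.issubset (PySem.Set.ofList [q]) s = decide (q ∈ s) := by
  by_cases h : q ∈ s
  · rw [decide_eq_true h]
    exact (PySem.Set.issubset_iff _ _).mpr fun x hx => by
      rw [PySem.Set.mem_ofList] at hx; simp at hx; rwa [hx]
  · rw [decide_eq_false h]
    exact Bool.eq_false_iff.mpr fun hc =>
      h ((PySem.Set.issubset_iff _ _).mp hc q (by rw [PySem.Set.mem_ofList]; simp))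

-- the early-return flag of the inner loop
lemma pv_inner_found (row column x : Int) (ys : List Int) (st : PySem.Set (Int × Int) × Bool) :
    (ys.foldl (pvStep row column x) st).2
      = (st.2 || (decide ((row, column) ∈ st.1) && ys.any (fun y => !(y = -1 || y = 10 || x = -1 || x = 10)))
              || ys.any (fun y => !(y = -1 || y = 10 || x = -1 || x = 10) && decide ((row, column) = (x, y)))) := by
  induction ys generalizing st with
  | nil => simp
  | cons y ys ih =>
    simp only [List.foldl_cons, List.any_cons]
    by_cases h2 : st.2 = true
    · rw [show pvStep row column x st y = st from by simp [pvStep, h2]]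
      rw [ih]; simp [h2]
    · by_cases hok : (!(y = -1 || y = 10 || x = -1 || x = 10)) = true
      · rw [show pvStep row column x st y
            = (PySem.Set.add st.1 (x, y), decide ((row, column) ∈ PySem.Set.add st.1 (x, y))) from by
            simp [pvStep, h2, hok, pv_issubset_single]]
        rw [ih]
        rw [Bool.eq_iff_iff]
        simp only [hok, PySem.Set.mem_add, Bool.or_eq_true, Bool.and_eq_true, decide_eq_true_eq,
          Bool.true_and, Bool.true_or, h2, Bool.false_or]
        tauto
      · rw [show pvStep row column x st y = st from by simp [pvStep, h2, hok]]
        rw [ih]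
        simp [hok]

-- membership of the query square in the inner loop's set, under the loop invariant
lemma pv_inner_mem (row column x : Int) (ys : List Int) (st : PySem.Set (Int × Int) × Bool)
    (hinv : st.2 = true → (row, column) ∈ st.1) :
    ((row, column) ∈ (ys.foldl (pvStep row column x) st).1
      ↔ (row, column) ∈ st.1 ∨ (ys.any (fun y => !(y = -1 || y = 10 || x = -1 || x = 10) && decide ((row, column) = (x, y)))) = true) := by
  induction ys generalizing st with
  | nil => simp
  | cons y ys ih =>
    simp only [List.foldl_cons, List.any_cons]
    by_cases h2 : st.2 = true
    · have hm := hinv h2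
      rw [show pvStep row column x st y = st from by simp [pvStep, h2]]
      rw [ih _ hinv]
      simp [hm]
    · by_cases hok : (!(y = -1 || y = 10 || x = -1 || x = 10)) = true
      · rw [show pvStep row column x st y
            = (PySem.Set.add st.1 (x, y), decide ((row, column) ∈ PySem.Set.add st.1 (x, y))) from by
            simp [pvStep, h2, hok, pv_issubset_single]]
        rw [ih _ (fun hh => of_decide_eq_true hh)]
        simp only [PySem.Set.mem_add, hok, Bool.true_and, Bool.or_eq_true, decide_eq_true_eq]
        tauto
      · rw [show pvStep row column x st y = st from by simp [pvStep, h2, hok]]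
        rw [ih _ hinv]
        simp [hok]

-- the invariant is preserved by the inner loop
lemma pv_inner_inv (row column x : Int) (ys : List Int) (st : PySem.Set (Int × Int) × Bool)
    (hinv : st.2 = true → (row, column) ∈ st.1) :
    (ys.foldl (pvStep row column x) st).2 = true → (row, column) ∈ (ys.foldl (pvStep row column x) st).1 := by
  induction ys generalizing st with
  | nil => exact hinv
  | cons y ys ih =>
    simp only [List.foldl_cons]
    by_cases h2 : st.2 = true
    · rw [show pvStep row column x st y = st from by simp [pvStep, h2]]; exact ih st hinv
    · by_cases hok : (!(y = -1 || y = 10 || x = -1 || x = 10)) = true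
      · rw [show pvStep row column x st y
            = (PySem.Set.add st.1 (x, y), decide ((row, column) ∈ PySem.Set.add st.1 (x, y))) from by
            simp [pvStep, h2, hok, pv_issubset_single]]
        exact ih _ (by simp)
      · rw [show pvStep row column x st y = st from by simp [pvStep, h2, hok]]; exact ih st hinv

-- the early-return flag of the whole 3×3 double loop
lemma pv_outer_found (row column : Int) (xs ys : List Int) (st : PySem.Set (Int × Int) × Bool)
    (hinv : st.2 = true → (row, column) ∈ st.1) :
    (xs.foldl (fun st x => ys.foldl (pvStep row column x) st) st).2
      = (st.2 || (decide ((row, column) ∈ st.1) && xs.any (fun x => ys.any (fun y => !(y = -1 || y = 10 || x = -1 || x = 10))))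
              || xs.any (fun x => ys.any (fun y => !(y = -1 || y = 10 || x = -1 || x = 10) && decide ((row, column) = (x, y))))) := by
  induction xs generalizing st with
  | nil => simp
  | cons x xs ih =>
    simp only [List.foldl_cons, List.any_cons]
    rw [ih _ (pv_inner_inv row column x ys st hinv), pv_inner_found]
    have hmem := pv_inner_mem row column x ys st hinv
    rw [Bool.eq_iff_iff]
    simp only [Bool.or_eq_true, Bool.and_eq_true, decide_eq_true_eq, hmem]
    tauto

-- coord_check is the Chebyshev-distance test with the -1/10 exclusion
set_option maxHeartbeats 2000000 in
lemma pv_coord_check_eq (row column : Int) (p : Int × Int) :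
    coord_check row column p
      = (((row - p.1).natAbs ≤ 1 && (column - p.2).natAbs ≤ 1)
          && !(row = -1 || row = 10 || column = -1 || column = 10)) := by
  obtain ⟨r, c⟩ := p
  have hx : PySem.List.pyRange (r - 1) (r + 2) 1 = [r - 1, r, r + 1] := by
    rw [PySem.List.pyRange_one_cons (by omega), PySem.List.pyRange_one_cons (by omega),
        PySem.List.pyRange_one_cons (by omega), PySem.List.pyRange_one_eq_nil (by omega)]
    norm_num
  have hy : PySem.List.pyRange (c - 1) (c + 2) 1 = [c - 1, c, c + 1] := by
    rw [PySem.List.pyRange_one_cons (by omega), PySem.List.pyRange_one_cons (by omega),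
        PySem.List.pyRange_one_cons (by omega), PySem.List.pyRange_one_eq_nil (by omega)]
    norm_num
  rw [show coord_check row column (r, c)
      = ((PySem.List.pyRange (r - 1) (r + 2) 1).foldl
          (fun st x => (PySem.List.pyRange (c - 1) (c + 2) 1).foldl (pvStep row column x) st)
          ((PySem.Set.empty : PySem.Set (Int × Int)), false)).2 from rfl]
  rw [hx, hy, pv_outer_found row column _ _ _ (fun hh => absurd hh (by simp))]
  rw [Bool.eq_iff_iff]
  simp only [List.any_cons, List.any_nil, Bool.or_eq_true, Bool.and_eq_true, decide_eq_true_eq,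
    Bool.not_eq_true', Bool.or_eq_false_iff, decide_eq_false_iff_not, Prod.mk.injEq,
    PySem.Set.empty, List.not_mem_nil, decide_false, Bool.false_and, Bool.false_or, Bool.or_false]
  constructor
  · intro h
    rcases h with (h | h | h) | (h | h | h) | (h | h | h) <;>
      · obtain ⟨h1, h2, h3⟩ := h
        refine ⟨⟨?_, ?_⟩, ?_⟩ <;> omega
  · rintro ⟨⟨ha, hb⟩, hc⟩
    have hr : row = r - 1 ∨ row = r ∨ row = r + 1 := by omega
    have hl : column = c - 1 ∨ column = c ∨ column = c + 1 := by omega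
    rcases hr with hr | hr | hr <;> rcases hl with hl | hl | hl
    · exact Or.inl (Or.inl ⟨⟨⟨⟨by omega, by omega⟩, by omega⟩, by omega⟩, by omega, by omega⟩)
    · exact Or.inl (Or.inr (Or.inl ⟨⟨⟨⟨by omega, by omega⟩, by omega⟩, by omega⟩, by omega, by omega⟩))
    · exact Or.inl (Or.inr (Or.inr ⟨⟨⟨⟨by omega, by omega⟩, by omega⟩, by omega⟩, by omega, by omega⟩))
    · exact Or.inr (Or.inl (Or.inl ⟨⟨⟨⟨by omega, by omega⟩, by omega⟩, by omega⟩, by omega, by omega⟩))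
    · exact Or.inr (Or.inl (Or.inr (Or.inl ⟨⟨⟨⟨by omega, by omega⟩, by omega⟩, by omega⟩, by omega, by omega⟩)))
    · exact Or.inr (Or.inl (Or.inr (Or.inr ⟨⟨⟨⟨by omega, by omega⟩, by omega⟩, by omega⟩, by omega, by omega⟩)))
    · exact Or.inr (Or.inr (Or.inl ⟨⟨⟨⟨by omega, by omega⟩, by omega⟩, by omega⟩, by omega, by omega⟩))
    · exact Or.inr (Or.inr (Or.inr (Or.inl ⟨⟨⟨⟨by omega, by omega⟩, by omega⟩, by omega⟩, by omega, by omega⟩)))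
    · exact Or.inr (Or.inr (Or.inr (Or.inr ⟨⟨⟨⟨by omega, by omega⟩, by omega⟩, by omega⟩, by omega, by omega⟩)))

lemma pv_any_add {α : Type} [BEq α] [LawfulBEq α] (s : PySem.Set α) (x : α) (p : α → Bool) :
    (PySem.Set.add s x).any p = (s.any p || p x) := by
  by_cases h : x ∈ s
  · rw [PySem.Set.add_of_mem h]
    cases hp : p x
    · simp
    · simp [List.any_eq_true.mpr ⟨x, h, hp⟩]
  · rw [PySem.Set.add_of_not_mem h]
    simp

lemma pv_any_foldl_add {α : Type} [BEq α] [LawfulBEq α] (f : Int → α) (l : List Int)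
    (s : PySem.Set α) (p : α → Bool) :
    (l.foldl (fun s i => PySem.Set.add s (f i)) s).any p = (s.any p || l.any (fun i => p (f i))) := by
  induction l generalizing s with
  | nil => simp
  | cons i l ih => simp [List.foldl_cons, ih, pv_any_add, Bool.or_assoc]

-- per ship: occupied-square scan of A = occupied-square scan of B
lemma pv_ship_any (row column r c : Int) (h : Bool) (len : Int) :
    (get_coordinates (r, c, h, len)).any (coord_check row column)
      = (PySem.List.pyRange 0 len 1).any (fun i =>
          (((row - (if h then r else r + i)).natAbs ≤ 1 && (column - (if h then c + i else c)).natAbs ≤ 1)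
            && !(row = -1 || row = 10 || column = -1 || column = 10))) := by
  cases h
  · rw [show get_coordinates (r, c, false, len)
        = (PySem.List.pyRange 0 len 1).foldl (fun s i => PySem.Set.add s (r + i, c)) PySem.Set.empty from rfl]
    rw [pv_any_foldl_add (fun i => (r + i, c))]
    simp [pv_coord_check_eq]
  · rw [show get_coordinates (r, c, true, len)
        = (PySem.List.pyRange 0 len 1).foldl (fun s i => PySem.Set.add s (r, c + i)) PySem.Set.empty from rfl]
    rw [pv_any_foldl_add (fun i => (r, c + i))]
    simp [pv_coord_check_eq]

-- ===== VERDICT (by name: the statement is the Claim_ definition above) =====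
theorem is_open_sea_spec : Claim_equal_is_open_sea := by
  intro row column fleet _
  unfold Spec_is_open_sea is_open_sea is_open_sea_alt
  by_cases hex : (row = -1 || row = 10 || column = -1 || column = 10) = true
  · rw [if_pos hex]
    simp only [Bool.not_eq_true', List.any_eq_false]
    intro ship _
    obtain ⟨r, c, h, len⟩ := ship
    rw [pv_ship_any]
    simp [hex]
  · rw [if_neg hex]
    have : fleet.any (fun ship => (get_coordinates ship).any (coord_check row column))
        = fleet.any (fun ship =>
            (PySem.List.pyRange 0 ship.2.2.2 1).any (fun i =>
              ((row - (if ship.2.2.1 then ship.1 else ship.1 + i)).natAbs ≤ 1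
                && (column - (if ship.2.2.1 then ship.2.1 + i else ship.2.1)).natAbs ≤ 1))) := by
      congr 1
      funext ship
      obtain ⟨r, c, h, len⟩ := ship
      rw [pv_ship_any]
      simp only [Bool.not_eq_true] at hex
      simp [hex]
    rw [this]
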